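-- pv_equiv track=rewrite | github.com/CvanderStoep/Project-Euler | mathlib/number_theory.py | repeating_decimal
-- ===== SOURCE A (Python) =====
-- from math import gcd, isqrt
--
-- def repeating_decimal(p, q):
--     p, q = p // gcd(p, q), q // gcd(p, q)
--
--     t = q
--     for prime in (2, 5):
--         while t % prime == 0:
--             t //= prime
--
--     if t == 1:
--         return "", ""
--
--     seen = {}
--     digits = []
--     remainder = p % q
--     pos = 0
--
--     while remainder not in seen:
--         seen[remainder] = pos
--         remainder *= 10
--         digits.append(str(remainder // q))
--         remainder %= q
--         pos += 1
--
--     start = seen[remainder]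
--     non_rep = "".join(digits[:start])
--     rep = "".join(digits[start:])
--     return non_rep, rep
-- ===== SOURCE B (Python) =====
-- from math import gcd
--
-- def repeating_decimal(p, q):
--     g = gcd(p, q)
--     p, q = p // g, q // g
--
--     a = 0
--     t = q
--     while t % 2 == 0:
--         t //= 2
--         a += 1
--     b = 0
--     while t % 5 == 0:
--         t //= 5
--         b += 1
--
--     if abs(t) == 1:
--         return "", ""
--
--     u = abs(t)
--     k = max(a, b)
--     period = 1
--     x = 10 % u
--     while x != 1:
--         x = x * 10 % u
--         period += 1
--
--     digits = []
--     remainder = p % q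
--     for _ in range(k + period):
--         remainder *= 10
--         digits.append(str(remainder // q))
--         remainder %= q
--     return "".join(digits[:k]), "".join(digits[k:])
-- ===== Notes on version B (the rewrite author's own statement) =====
-- stated objective: alternative
-- what changed: B replaces A's dict-based cycle detection (hash the remainder stream until a repeat, split at the remembered index) by an analytic computation: factor the reduced denominator as 2^a*5^b*u, take non-repeating length k = max(a,b) and period = multiplicative order of 10 mod u, then generate exactly k+period digits.
-- intended difference: On negative q whose reduced denominator is a pure product of 2s and 5s (a terminating decimal, e.g. (1, -2)), A's sentinel test 't == 1' never fires (t is -1) and A returns a spurious pair such as ('5', '0'), while B returns ('', '') exactly as both do for the same fraction with positive q - the intended value. — e.g. on repeating_decimal(1, -2): A returns ("5", "0"), B returns ("", "")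
import Mathlib
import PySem

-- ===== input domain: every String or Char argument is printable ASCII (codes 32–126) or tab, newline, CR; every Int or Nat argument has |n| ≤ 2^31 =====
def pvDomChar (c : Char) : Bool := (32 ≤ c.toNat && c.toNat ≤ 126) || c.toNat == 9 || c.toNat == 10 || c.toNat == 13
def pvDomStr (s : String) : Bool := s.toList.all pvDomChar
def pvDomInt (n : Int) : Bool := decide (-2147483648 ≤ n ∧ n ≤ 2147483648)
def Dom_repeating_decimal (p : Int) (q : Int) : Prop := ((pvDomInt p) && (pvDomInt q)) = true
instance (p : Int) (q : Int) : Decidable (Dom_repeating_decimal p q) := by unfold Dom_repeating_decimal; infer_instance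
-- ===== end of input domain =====

-- B replaces A's dict-based cycle detection by the analytic decomposition q = 2^a·5^b·u: the
-- non-repeating length is max(a,b) and the period is the multiplicative order of 10 mod u
-- (objective: alternative algorithm, similar cost).

-- ===== PORT A =====

-- A's inner 'while t % prime == 0: t //= prime' (the 't ≠ 0 ∧ 1 < f' conjuncts only make the
-- recursion well-founded; Python diverges at t = 0, which Pre_ excludes via q ≠ 0)
def pvStripAGo (f : Int) : Nat → Int → Int
  | 0, t => t
  | fuel + 1, t =>
    if t ≠ 0 ∧ PySem.Int.mod t f = 0 ∧ 1 < f then pvStripAGo f fuel (PySem.Int.floordiv t f) else t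

def pvStripA (f : Int) (t : Int) : Int := pvStripAGo f t.natAbs t

-- A's 'while remainder not in seen' loop; fuel makes it structurally recursive (the proofs show
-- the fuel |q'| + 1 is never exhausted when q ≠ 0)
def pvLoopA (q : Int) : Nat → PySem.Dict Int Int → List String → Int → Int → String × String
  | 0, _, _, _, _ => ("", "")
  | fuel + 1, seen, digits, remainder, pos =>
    match seen.get? remainder with
    | some start =>
      (PySem.Str.join "" (PySem.List.slice digits none (some start)),
       PySem.Str.join "" (PySem.List.slice digits (some start) none))
    | none =>
      pvLoopA q fuel (seen.insert remainder pos)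
        (digits ++ [PySem.Int.toStr (PySem.Int.floordiv (remainder * 10) q)])
        (PySem.Int.mod (remainder * 10) q) (pos + 1)

def repeating_decimal (p : Int) (q : Int) : String × String :=
  let g : Int := Int.gcd p q
  let p' := PySem.Int.floordiv p g
  let q' := PySem.Int.floordiv q g
  let t := pvStripA 5 (pvStripA 2 q')
  if t = 1 then ("", "")
  else pvLoopA q' (q'.natAbs + 1) PySem.Dict.empty [] (PySem.Int.mod p' q') 0

-- ===== PORT B =====

-- B's counting strip loop 'while t % f == 0: t //= f; a += 1' (same totality guard as above)
def pvStripCountGo (f : Int) : Nat → Int → Int → Int × Int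
  | 0, t, acc => (t, acc)
  | fuel + 1, t, acc =>
    if t ≠ 0 ∧ PySem.Int.mod t f = 0 ∧ 1 < f then pvStripCountGo f fuel (PySem.Int.floordiv t f) (acc + 1)
    else (t, acc)

def pvStripCount (f : Int) (t : Int) (acc : Int) : Int × Int := pvStripCountGo f t.natAbs t acc

-- B's 'while x != 1' multiplicative-order loop; fuel u (never exhausted: the order is < u)
def pvOrderLoop (u : Int) : Nat → Int → Int → Int
  | 0, _, period => period
  | fuel + 1, x, period =>
    if x = 1 then period
    else pvOrderLoop u fuel (PySem.Int.mod (x * 10) u) (period + 1)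

-- B's 'for _ in range(k + period)' digit-generation loop
def pvDigitsLoop (q : Int) : Nat → Int → List String → List String
  | 0, _, digits => digits
  | n + 1, remainder, digits =>
    pvDigitsLoop q n (PySem.Int.mod (remainder * 10) q)
      (digits ++ [PySem.Int.toStr (PySem.Int.floordiv (remainder * 10) q)])

def repeating_decimal_alt (p : Int) (q : Int) : String × String :=
  let g : Int := Int.gcd p q
  let p' := PySem.Int.floordiv p g
  let q' := PySem.Int.floordiv q g
  let s2 := pvStripCount 2 q' 0
  let s5 := pvStripCount 5 s2.1 0
  let t := s5.1
  if t.natAbs = 1 then ("", "")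
  else
    let u : Int := t.natAbs
    let k : Int := max s2.2 s5.2
    let period := pvOrderLoop u u.natAbs (PySem.Int.mod 10 u) 1
    let digits := pvDigitsLoop q' (k + period).toNat (PySem.Int.mod p' q') []
    (PySem.Str.join "" (PySem.List.slice digits none (some k)),
     PySem.Str.join "" (PySem.List.slice digits (some k) none))

-- ===== PRECONDITION & SPEC =====

-- Pre_ excludes q = 0 only: there Python A raises ZeroDivisionError (p = 0) or loops forever.
def Pre_repeating_decimal (p : Int) (q : Int) : Prop := q ≠ 0
instance (p : Int) (q : Int) : Decidable (Pre_repeating_decimal p q) := by unfold Pre_repeating_decimal; infer_instance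
def pvWitness_repeating_decimal : Int × Int := (1, 3)

-- helper for D_: is n a product of 2s and 5s only?  (proof-free input arithmetic, not either port's code)
def pvOnly25Go : Nat → Nat → Bool
  | 0, n => n = 1
  | fuel + 1, n =>
    if n % 2 = 0 ∧ n ≠ 0 then pvOnly25Go fuel (n / 2)
    else if n % 5 = 0 ∧ n ≠ 0 then pvOnly25Go fuel (n / 5)
    else n = 1

def pvOnly25 (n : Nat) : Bool := pvOnly25Go n n

-- On negative q whose reduced denominator is a pure 2^a·5^b (a terminating decimal, e.g. (1, -2)),
-- A's sentinel test 't == 1' never fires (t is -1) and A returns a spurious pair such as ('5', '0'),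
-- while B returns ('', '') as it does for the same terminating fraction with positive q — the intended value.
def D_repeating_decimal (p : Int) (q : Int) : Prop :=
  q < 0 ∧ pvOnly25 (q.natAbs / Int.gcd p q) = true
instance (p : Int) (q : Int) : Decidable (D_repeating_decimal p q) := by unfold D_repeating_decimal; infer_instance

def Spec_repeating_decimal (p : Int) (q : Int) (out : String × String) : Prop :=
  ¬ D_repeating_decimal p q → out = repeating_decimal_alt p q
instance (p : Int) (q : Int) (out : String × String) : Decidable (Spec_repeating_decimal p q out) := by unfold Spec_repeating_decimal; infer_instance

def pvDiffWitness_repeating_decimal : Int × Int := (1, -2)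
def pvDiffWitnessOut_repeating_decimal : (String × String) × (String × String) := (("5", "0"), ("", ""))

-- ===== CLAIM (what is proved, stated in full; the proofs are below) =====
def Claim_unchanged_repeating_decimal : Prop := ∀ (p : Int) (q : Int), Dom_repeating_decimal p q → Pre_repeating_decimal p q → Spec_repeating_decimal p q (repeating_decimal p q)
def Claim_changed_repeating_decimal : Prop := Dom_repeating_decimal (pvDiffWitness_repeating_decimal.1) (pvDiffWitness_repeating_decimal.2) ∧ Pre_repeating_decimal (pvDiffWitness_repeating_decimal.1) (pvDiffWitness_repeating_decimal.2) ∧ D_repeating_decimal (pvDiffWitness_repeating_decimal.1) (pvDiffWitness_repeating_decimal.2) ∧ repeating_decimal (pvDiffWitness_repeating_decimal.1) (pvDiffWitness_repeating_decimal.2) = pvDiffWitnessOut_repeating_decimal.1 ∧ repeating_decimal_alt (pvDiffWitness_repeating_decimal.1) (pvDiffWitness_repeating_decimal.2) = pvDiffWitnessOut_repeating_decimal.2 ∧ pvDiffWitnessOut_repeating_decimal.1 ≠ pvDiffWitnessOut_repeating_decimal.2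
def Claim_exact_repeating_decimal : Prop := ∀ (p : Int) (q : Int), Dom_repeating_decimal p q → Pre_repeating_decimal p q → D_repeating_decimal p q → repeating_decimal p q ≠ repeating_decimal_alt p q

-- ===== LEMMAS AND PROOFS =====

-- remainder sequence r_{i+1} = (r_i * 10) % Q, r_0 = P % Q  (shared shape of both digit loops)
def pvR (P Q : Int) : Nat → Int
  | 0 => PySem.Int.mod P Q
  | i + 1 => PySem.Int.mod (pvR P Q i * 10) Q

def pvDig (P Q : Int) (i : Nat) : String :=
  PySem.Int.toStr (PySem.Int.floordiv (pvR P Q i * 10) Q)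

def pvDigits (P Q : Int) (n : Nat) : List String := (List.range n).map (pvDig P Q)

-- ---- PySem floor-mod toolbox ----
lemma pvmod_exact {x Q : Int} (h : PySem.Int.mod x Q = 0) : PySem.Int.floordiv x Q * Q = x := by
  have h0 := PySem.Int.floordiv_mul_add_mod x Q; omega

lemma pvmod_sub_dvd (x Q : Int) : Q ∣ (x - PySem.Int.mod x Q) := by
  have h0 := PySem.Int.floordiv_mul_add_mod x Q
  refine ⟨PySem.Int.floordiv x Q, ?_⟩
  have h2 := mul_comm Q (PySem.Int.floordiv x Q)
  linarith

lemma pvmod_eq_iff {Q : Int} (hQ : Q ≠ 0) (x y : Int) :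
    PySem.Int.mod x Q = PySem.Int.mod y Q ↔ Q ∣ (x - y) := by
  constructor
  · intro h
    obtain ⟨c, hc⟩ := pvmod_sub_dvd x Q
    obtain ⟨d, hd⟩ := pvmod_sub_dvd y Q
    refine ⟨c - d, ?_⟩
    have := mul_sub Q c d
    linarith
  · rintro ⟨c, hc⟩
    obtain ⟨cx, hcx⟩ := pvmod_sub_dvd x Q
    obtain ⟨cy, hcy⟩ := pvmod_sub_dvd y Q
    have key : PySem.Int.mod x Q - PySem.Int.mod y Q = Q * (cy + c - cx) := by
      have h1 := mul_add Q cy c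
      have h2 := mul_sub Q (cy + c) cx
      linarith
    set w : Int := cy + c - cx with hw
    have hzero : w = 0 := by
      rcases lt_trichotomy Q 0 with hQn | hQ0 | hQp
      · have bx := PySem.Int.mod_neg_bounds x hQn
        have by' := PySem.Int.mod_neg_bounds y hQn
        rcases lt_trichotomy w 0 with h | h | h
        · have h1 : w ≤ -1 := by omega
          nlinarith
        · exact h
        · have h1 : 1 ≤ w := by omega
          nlinarith
      · exact absurd hQ0 hQ
      · have bx1 := PySem.Int.mod_nonneg x hQp
        have bx2 := PySem.Int.mod_lt x hQp
        have by1 := PySem.Int.mod_nonneg y hQp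
        have by2 := PySem.Int.mod_lt y hQp
        rcases lt_trichotomy w 0 with h | h | h
        · have h1 : w ≤ -1 := by omega
          nlinarith
        · exact h
        · have h1 : 1 ≤ w := by omega
          nlinarith
    rw [hzero, mul_zero] at key
    omega

lemma pvR_eq (P Q : Int) (hQ : Q ≠ 0) (i : Nat) :
    pvR P Q i = PySem.Int.mod (P * 10 ^ i) Q := by
  induction i with
  | zero => simp [pvR]
  | succ i ih =>
    show PySem.Int.mod (pvR P Q i * 10) Q = _
    rw [ih]
    refine (pvmod_eq_iff hQ _ _).mpr ?_
    have h2 : Q ∣ ((P * 10 ^ i - PySem.Int.mod (P * 10 ^ i) Q) * 10) :=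
      (pvmod_sub_dvd (P * 10 ^ i) Q).mul_right 10
    have h3 : PySem.Int.mod (P * 10 ^ i) Q * 10 - P * 10 ^ (i + 1) =
        -((P * 10 ^ i - PySem.Int.mod (P * 10 ^ i) Q) * 10) := by ring
    rw [h3]
    exact dvd_neg.mpr h2

-- ---- strip-loop specs ----
lemma pvStripAGo_eq_fst (f : Int) (fuel : Nat) (t acc : Int) :
    pvStripAGo f fuel t = (pvStripCountGo f fuel t acc).1 := by
  induction fuel generalizing t acc with
  | zero => rfl
  | succ fuel ih =>
    simp only [pvStripAGo, pvStripCountGo]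
    split
    · exact ih _ _
    · rfl

lemma pvStripCountGo_spec (f : Int) (hf : 1 < f) (fuel : Nat) (t acc : Int)
    (ht : t ≠ 0) (hfuel : t.natAbs ≤ fuel) :
    ∃ n : Nat, (pvStripCountGo f fuel t acc).2 = acc + n ∧
      t = f ^ n * (pvStripCountGo f fuel t acc).1 ∧
      ¬ f ∣ (pvStripCountGo f fuel t acc).1 ∧ (pvStripCountGo f fuel t acc).1 ≠ 0 := by
  induction fuel generalizing t acc with
  | zero => omega
  | succ fuel ih =>
    by_cases hcond : t ≠ 0 ∧ PySem.Int.mod t f = 0 ∧ 1 < f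
    · have hm := hcond.2.1
      have hx : f ∣ t := (PySem.Int.mod_eq_zero_iff_dvd t f).mp hm
      have hex : PySem.Int.floordiv t f * f = t := pvmod_exact hm
      have ht' : PySem.Int.floordiv t f ≠ 0 := by
        intro h0; rw [h0, zero_mul] at hex; exact ht hex.symm
      have hnat : (PySem.Int.floordiv t f).natAbs * f.natAbs = t.natAbs := by
        have h0 := congrArg Int.natAbs hex
        rw [Int.natAbs_mul] at h0
        exact h0
      have hfuel' : (PySem.Int.floordiv t f).natAbs ≤ fuel := by
        have h2 : 2 ≤ f.natAbs := by omega
        have h3 : (PySem.Int.floordiv t f).natAbs ≠ 0 := by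
          intro h0; apply ht'; omega
        have h4 : (PySem.Int.floordiv t f).natAbs * 2 ≤ (PySem.Int.floordiv t f).natAbs * f.natAbs :=
          Nat.mul_le_mul_left _ h2
        omega
      have heq : pvStripCountGo f (fuel + 1) t acc =
          pvStripCountGo f fuel (PySem.Int.floordiv t f) (acc + 1) := by
        simp only [pvStripCountGo]
        rw [if_pos hcond]
      obtain ⟨n, h1, h2, h3, h4⟩ := ih (PySem.Int.floordiv t f) (acc + 1) ht' hfuel'
      refine ⟨n + 1, ?_, ?_, ?_, ?_⟩
      · rw [heq, h1]; push_cast; ring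
      · rw [heq]
        calc t = PySem.Int.floordiv t f * f := hex.symm
          _ = (f ^ n * (pvStripCountGo f fuel (PySem.Int.floordiv t f) (acc + 1)).1) * f := by
              rw [← h2]
          _ = f ^ (n + 1) * (pvStripCountGo f fuel (PySem.Int.floordiv t f) (acc + 1)).1 := by
              ring
      · rw [heq]; exact h3
      · rw [heq]; exact h4
    · have heq : pvStripCountGo f (fuel + 1) t acc = (t, acc) := by
        simp only [pvStripCountGo]
        rw [if_neg hcond]
      refine ⟨0, by rw [heq]; simp, by rw [heq]; simp, ?_, by rw [heq]; exact ht⟩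
      rw [heq]
      intro hdvd
      apply hcond
      refine ⟨ht, (PySem.Int.mod_eq_zero_iff_dvd t f).mpr hdvd, hf⟩

-- ---- pvOnly25 spec ----
lemma pv_two_dvd_pow5 {y : Nat} (h : 2 ∣ 5 ^ y) : False := by
  have h2 : (2 : Nat).Prime := by norm_num
  have := h2.dvd_of_dvd_pow h
  omega

lemma pvOnly25Go_iff (fuel : Nat) : ∀ (n : Nat), n ≠ 0 → n ≤ fuel + 1 →
    (pvOnly25Go fuel n = true ↔ ∃ x y : Nat, n = 2 ^ x * 5 ^ y) := by
  induction fuel with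
  | zero =>
    intro n hn hle
    have h1 : n = 1 := by omega
    subst h1
    simp only [pvOnly25Go]
    simp
    exact ⟨0, 0, by norm_num⟩
  | succ fuel ih =>
    intro n hn hle
    by_cases h2 : n % 2 = 0
    · have hgo : pvOnly25Go (fuel + 1) n = pvOnly25Go fuel (n / 2) := by
        simp only [pvOnly25Go]
        rw [if_pos ⟨h2, hn⟩]
      have hn2 : n / 2 ≠ 0 := by omega
      have hle2 : n / 2 ≤ fuel + 1 := by omega
      rw [hgo, ih (n / 2) hn2 hle2]
      constructor
      · rintro ⟨x, y, hxy⟩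
        refine ⟨x + 1, y, ?_⟩
        have : n = 2 * (n / 2) := by omega
        rw [this, hxy]; ring
      · rintro ⟨x, y, hxy⟩
        match x with
        | 0 =>
          exfalso
          apply pv_two_dvd_pow5 (y := y)
          rw [hxy] at h2
          simp at h2
          omega
        | x + 1 =>
          refine ⟨x, y, ?_⟩
          have : n = 2 * (2 ^ x * 5 ^ y) := by rw [hxy]; ring
          omega
    · by_cases h5 : n % 5 = 0
      · have hgo : pvOnly25Go (fuel + 1) n = pvOnly25Go fuel (n / 5) := by
          simp only [pvOnly25Go]
          rw [if_neg (by omega), if_pos ⟨h5, hn⟩]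
        have hn5 : n / 5 ≠ 0 := by omega
        have hle5 : n / 5 ≤ fuel + 1 := by omega
        rw [hgo, ih (n / 5) hn5 hle5]
        constructor
        · rintro ⟨x, y, hxy⟩
          refine ⟨x, y + 1, ?_⟩
          have : n = 5 * (n / 5) := by omega
          rw [this, hxy]; ring
        · rintro ⟨x, y, hxy⟩
          match x, y with
          | 0, 0 => exfalso; rw [hxy] at h5; norm_num at h5
          | x + 1, y =>
            exfalso
            have : n % 2 = 0 := by
              have : n = 2 * (2 ^ x * 5 ^ y) := by rw [hxy]; ring
              omega
            exact h2 this
          | 0, y + 1 =>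
            refine ⟨0, y, ?_⟩
            have : n = 5 * (2 ^ 0 * 5 ^ y) := by rw [hxy]; ring
            omega
      · have hgo : pvOnly25Go (fuel + 1) n = decide (n = 1) := by
          simp only [pvOnly25Go]
          rw [if_neg (by omega), if_neg (by omega)]
        rw [hgo]
        simp only [decide_eq_true_eq]
        constructor
        · intro h1; exact ⟨0, 0, by omega⟩
        · rintro ⟨x, y, hxy⟩
          match x, y with
          | 0, 0 => omega
          | x + 1, y =>
            exfalso
            have : n = 2 * (2 ^ x * 5 ^ y) := by rw [hxy]; ring
            omega
          | 0, y + 1 =>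
            exfalso
            have : n = 5 * (2 ^ 0 * 5 ^ y) := by rw [hxy]; ring
            omega

-- ---- Nat number theory ----
lemma pvcop10 {u : Nat} (h2 : ¬ 2 ∣ u) (h5 : ¬ 5 ∣ u) : Nat.Coprime u 10 := by
  have c2 : Nat.Coprime u 2 :=
    Nat.coprime_comm.mp ((Nat.Prime.coprime_iff_not_dvd Nat.prime_two).mpr h2)
  have c5 : Nat.Coprime u 5 :=
    Nat.coprime_comm.mp ((Nat.Prime.coprime_iff_not_dvd Nat.prime_five).mpr h5)
  have : Nat.Coprime u (2 * 5) := Nat.Coprime.mul_right c2 c5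
  simpa using this

lemma pvOrdEx {u : Nat} (hu : 0 < u) (h2 : ¬ 2 ∣ u) (h5 : ¬ 5 ∣ u) :
    ∃ m : Nat, 0 < m ∧ u ∣ 10 ^ m - 1 := by
  refine ⟨Nat.totient u, Nat.totient_pos.mpr hu, ?_⟩
  have hcop : Nat.Coprime 10 u := (pvcop10 h2 h5).symm
  have h := Nat.ModEq.pow_totient hcop
  have h1 : (1 : Nat) ≤ 10 ^ Nat.totient u := Nat.one_le_pow _ _ (by norm_num)
  exact (Nat.modEq_iff_dvd' h1).mp h.symm

lemma pvOrdChar {u : Nat} (hu : 0 < u) (h2 : ¬ 2 ∣ u) (h5 : ¬ 5 ∣ u) (d : Nat) :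
    u ∣ 10 ^ d - 1 ↔ Nat.find (pvOrdEx hu h2 h5) ∣ d := by
  set mm := Nat.find (pvOrdEx hu h2 h5) with hmmdef
  obtain ⟨hmm0, hmmd⟩ := Nat.find_spec (pvOrdEx hu h2 h5)
  have hmmE : (10 : Nat) ^ mm ≡ 1 [MOD u] :=
    ((Nat.modEq_iff_dvd' (Nat.one_le_pow _ _ (by norm_num))).mpr hmmd).symm
  constructor
  · intro hd
    have hr : u ∣ 10 ^ (d % mm) - 1 := by
      have hsplit : d = mm * (d / mm) + d % mm := (Nat.div_add_mod d mm).symm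
      have hpow : (10 : Nat) ^ d ≡ 10 ^ (d % mm) [MOD u] := by
        calc (10 : Nat) ^ d = (10 ^ mm) ^ (d / mm) * 10 ^ (d % mm) := by
              rw [← pow_mul, ← pow_add, ← hsplit]
          _ ≡ 1 ^ (d / mm) * 10 ^ (d % mm) [MOD u] :=
              Nat.ModEq.mul (hmmE.pow _) (Nat.ModEq.refl _)
          _ = 10 ^ (d % mm) := by rw [one_pow, one_mul]
      have h1 : (10 : Nat) ^ d ≡ 1 [MOD u] :=
        ((Nat.modEq_iff_dvd' (Nat.one_le_pow _ _ (by norm_num))).mpr hd).symm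
      have h2' : (10 : Nat) ^ (d % mm) ≡ 1 [MOD u] := hpow.symm.trans h1
      exact (Nat.modEq_iff_dvd' (Nat.one_le_pow _ _ (by norm_num))).mp h2'.symm
    by_cases hz : d % mm = 0
    · exact Nat.dvd_of_mod_eq_zero hz
    · exfalso
      have hlt : d % mm < mm := Nat.mod_lt _ hmm0
      exact Nat.find_min (pvOrdEx hu h2 h5) hlt ⟨Nat.pos_of_ne_zero hz, hr⟩
  · rintro ⟨c, rfl⟩
    have : (10 : Nat) ^ (mm * c) ≡ 1 [MOD u] := by
      calc (10 : Nat) ^ (mm * c) = (10 ^ mm) ^ c := by rw [pow_mul]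
        _ ≡ 1 ^ c [MOD u] := hmmE.pow _
        _ = 1 := one_pow _
    exact (Nat.modEq_iff_dvd' (Nat.one_le_pow _ _ (by norm_num))).mp this.symm

lemma pvNatKey {a b u : Nat} (h2 : ¬ 2 ∣ u) (h5 : ¬ 5 ∣ u) (i d : Nat) (hd : 0 < d) :
    2 ^ a * 5 ^ b * u ∣ 10 ^ i * (10 ^ d - 1) ↔ (max a b ≤ i ∧ u ∣ 10 ^ d - 1) := by
  have hpow1 : (1 : Nat) ≤ 10 ^ d := Nat.one_le_pow _ _ (by norm_num)
  have h10d : (2 : Nat) ∣ 10 ^ d := dvd_pow (by norm_num) (by omega)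
  have odd2 : ¬ (2 : Nat) ∣ 10 ^ d - 1 := by
    intro h; omega
  have h10d5 : (5 : Nat) ∣ 10 ^ d := dvd_pow (by norm_num) (by omega)
  have odd5 : ¬ (5 : Nat) ∣ 10 ^ d - 1 := by
    intro h; omega
  have cop2 : Nat.Coprime (2 ^ a) (10 ^ d - 1) :=
    Nat.Coprime.pow_left a ((Nat.Prime.coprime_iff_not_dvd Nat.prime_two).mpr odd2)
  have cop5 : Nat.Coprime (5 ^ b) (10 ^ d - 1) :=
    Nat.Coprime.pow_left b ((Nat.Prime.coprime_iff_not_dvd Nat.prime_five).mpr odd5)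
  have cop25 : Nat.Coprime (2 ^ a) (5 ^ b) :=
    Nat.Coprime.pow a b (by norm_num)
  constructor
  · intro h
    have hu : u ∣ 10 ^ i * (10 ^ d - 1) :=
      dvd_trans (Dvd.intro_left _ rfl) h
    have hu' : u ∣ 10 ^ d - 1 :=
      Nat.Coprime.dvd_of_dvd_mul_left ((pvcop10 h2 h5).pow_right i) hu
    have h2a : (2 : Nat) ^ a ∣ 10 ^ i * (10 ^ d - 1) :=
      dvd_trans ⟨5 ^ b * u, by ring⟩ h
    have h2a' : (2 : Nat) ^ a ∣ 10 ^ i := Nat.Coprime.dvd_of_dvd_mul_right cop2 h2a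
    have h2a'' : (2 : Nat) ^ a ∣ 2 ^ i := by
      have : (10 : Nat) ^ i = 2 ^ i * 5 ^ i := by rw [← mul_pow]; norm_num
      rw [this] at h2a'
      exact Nat.Coprime.dvd_of_dvd_mul_right (Nat.Coprime.pow a i (by norm_num)) h2a'
    have ha : a ≤ i := Nat.pow_dvd_pow_iff_le_right'.mp h2a''
    have h5b : (5 : Nat) ^ b ∣ 10 ^ i * (10 ^ d - 1) :=
      dvd_trans ⟨2 ^ a * u, by ring⟩ h
    have h5b' : (5 : Nat) ^ b ∣ 10 ^ i := Nat.Coprime.dvd_of_dvd_mul_right cop5 h5b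
    have h5b'' : (5 : Nat) ^ b ∣ 5 ^ i := by
      have : (10 : Nat) ^ i = 5 ^ i * 2 ^ i := by rw [← mul_pow]; norm_num
      rw [this] at h5b'
      exact Nat.Coprime.dvd_of_dvd_mul_right (Nat.Coprime.pow b i (by norm_num)) h5b'
    have hb : b ≤ i := Nat.pow_dvd_pow_iff_le_right'.mp h5b''
    exact ⟨max_le ha hb, hu'⟩
  · rintro ⟨hmax, hu⟩
    have ha : a ≤ i := le_trans (le_max_left _ _) hmax
    have hb : b ≤ i := le_trans (le_max_right _ _) hmax
    have h2i : (2 : Nat) ^ a ∣ 10 ^ i :=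
      dvd_trans (pow_dvd_pow 2 ha) (pow_dvd_pow_of_dvd (by norm_num) i)
    have h5i : (5 : Nat) ^ b ∣ 10 ^ i :=
      dvd_trans (pow_dvd_pow 5 hb) (pow_dvd_pow_of_dvd (by norm_num) i)
    have h25 : (2 : Nat) ^ a * 5 ^ b ∣ 10 ^ i :=
      Nat.Coprime.mul_dvd_of_dvd_of_dvd cop25 h2i h5i
    exact mul_dvd_mul h25 hu

-- ---- the master equivalence for the remainder sequence ----
lemma pvKey {P Q : Int} (hQ : Q ≠ 0) (hcop : Int.gcd P Q = 1)
    {a b u : Nat} (h2 : ¬ 2 ∣ u) (h5 : ¬ 5 ∣ u) (hu : 0 < u)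
    (hdec : Q.natAbs = 2 ^ a * 5 ^ b * u) (i j : Nat) (hij : i < j) :
    pvR P Q i = pvR P Q j ↔ (max a b ≤ i ∧ u ∣ 10 ^ (j - i) - 1) := by
  have hd : 0 < j - i := by omega
  rw [pvR_eq P Q hQ i, pvR_eq P Q hQ j, pvmod_eq_iff hQ]
  have hfact : P * 10 ^ i - P * 10 ^ j = -(P * 10 ^ i * ((10 : Int) ^ (j - i) - 1)) := by
    have hj : i + (j - i) = j := by omega
    have hp : (10 : Int) ^ j = 10 ^ i * 10 ^ (j - i) := by rw [← pow_add, hj]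
    rw [hp]; ring
  rw [hfact, dvd_neg]
  have hcast : ((10 : Int) ^ (j - i) - 1) = (((10 ^ (j - i) - 1 : Nat) : Int)) := by
    have h1 : (1 : Nat) ≤ 10 ^ (j - i) := Nat.one_le_pow _ _ (by norm_num)
    push_cast [h1]
    ring
  rw [hcast]
  rw [← Int.natAbs_dvd_natAbs]
  rw [Int.natAbs_mul, Int.natAbs_mul, Int.natAbs_pow]
  have hQP : Nat.Coprime Q.natAbs P.natAbs := by
    unfold Int.gcd at hcop
    exact Nat.coprime_comm.mp hcop
  have hstep : Q.natAbs ∣ P.natAbs * ((10 : Int).natAbs ^ (i) * ((10 ^ (j - i) - 1 : Nat) : Int).natAbs)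
      ↔ Q.natAbs ∣ (10 : Int).natAbs ^ i * ((10 ^ (j - i) - 1 : Nat) : Int).natAbs := by
    constructor
    · intro h
      exact Nat.Coprime.dvd_of_dvd_mul_left hQP h
    · intro h
      exact Dvd.dvd.mul_left h _
  rw [mul_assoc, hstep]
  have h10 : (10 : Int).natAbs = 10 := rfl
  have habs : ((10 ^ (j - i) - 1 : Nat) : Int).natAbs = 10 ^ (j - i) - 1 := Int.natAbs_natCast _
  rw [h10, habs, hdec]
  exact pvNatKey h2 h5 i (j - i) hd

-- ---- generic loop lemmas ----
lemma pvfind_range {p : Nat → Bool} {n k : Nat} (hk : k < n) (hpk : p k = true)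
    (hlt : ∀ i < k, p i = false) : (List.range n).find? p = some k := by
  induction n with
  | zero => omega
  | succ n ih =>
    rw [List.range_succ, List.find?_append]
    by_cases hkn : k < n
    · rw [ih hkn]; rfl
    · have hk' : k = n := by omega
      subst hk'
      have hnone : (List.range k).find? p = none := by
        rw [List.find?_eq_none]
        intro x hx
        rw [List.mem_range] at hx
        simp [hlt x hx]
      rw [hnone]
      simp [List.find?, hpk]

lemma pvLoopA_run {P Q : Int} (hQ : Q ≠ 0) {N k : Nat} (hkN : k < N)
    (hinj : ∀ j < N, ∀ i < j, pvR P Q i ≠ pvR P Q j)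
    (hfin : pvR P Q N = pvR P Q k)
    (hfirst : ∀ i < k, pvR P Q i ≠ pvR P Q N) :
    ∀ (fuel j : Nat) (seen : PySem.Dict Int Int), j ≤ N → N + 1 ≤ fuel + j →
    (∀ x : Int, seen.get? x = ((List.range j).find? (fun i => pvR P Q i == x)).map (fun i => (i : Int))) →
    pvLoopA Q fuel seen (pvDigits P Q j) (pvR P Q j) (j : Int) =
      (PySem.Str.join "" (PySem.List.slice (pvDigits P Q N) none (some (k : Int))),
       PySem.Str.join "" (PySem.List.slice (pvDigits P Q N) (some (k : Int)) none)) := by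
  intro fuel
  induction fuel with
  | zero => intro j seen hjN hfuel hseen; omega
  | succ fuel ih =>
    intro j seen hjN hfuel hseen
    by_cases hjeq : j = N
    · subst hjeq
      have hfind : (List.range j).find? (fun i => pvR P Q i == pvR P Q j) = some k := by
        apply pvfind_range hkN
        · simp [hfin.symm]
        · intro i hik
          simp only [beq_eq_false_iff_ne, ne_eq, beq_iff_eq]
          exact hfirst i hik
      have hget : seen.get? (pvR P Q j) = some ((k : Nat) : Int) := by
        rw [hseen, hfind]; rfl
      show pvLoopA Q (fuel + 1) seen (pvDigits P Q j) (pvR P Q j) (j : Int) = _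
      simp only [pvLoopA, hget]
    · have hjlt : j < N := by omega
      have hfind : (List.range j).find? (fun i => pvR P Q i == pvR P Q j) = none := by
        rw [List.find?_eq_none]
        intro x hx
        rw [List.mem_range] at hx
        simp only [beq_iff_eq]
        exact hinj j hjlt x hx
      have hget : seen.get? (pvR P Q j) = none := by rw [hseen, hfind]; rfl
      show pvLoopA Q (fuel + 1) seen (pvDigits P Q j) (pvR P Q j) (j : Int) = _
      simp only [pvLoopA, hget]
      have hdig : pvDigits P Q j ++ [PySem.Int.toStr (PySem.Int.floordiv (pvR P Q j * 10) Q)] =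
          pvDigits P Q (j + 1) := by
        unfold pvDigits
        rw [List.range_succ, List.map_append]
        rfl
      have hrem : PySem.Int.mod (pvR P Q j * 10) Q = pvR P Q (j + 1) := rfl
      have hpos : (j : Int) + 1 = ((j + 1 : Nat) : Int) := by push_cast; ring
      rw [hdig, hrem, hpos]
      apply ih (j + 1) _ (by omega) (by omega)
      intro x
      rw [PySem.Dict.get?_insert]
      by_cases hx : x = pvR P Q j
      · subst hx
        rw [if_pos rfl]
        have : (List.range (j + 1)).find? (fun i => pvR P Q i == pvR P Q j) = some j := by
          apply pvfind_range (by omega)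
          · simp
          · intro i hij
            simp only [beq_eq_false_iff_ne, ne_eq, beq_iff_eq]
            exact hinj j hjlt i hij
        rw [this]; rfl
      · rw [if_neg hx, hseen, List.range_succ, List.find?_append]
        have hlast : ([j].find? (fun i => pvR P Q i == x)) = none := by
          simp only [List.find?]
          have : (pvR P Q j == x) = false := by
            simp only [beq_eq_false_iff_ne, ne_eq]
            intro h; exact hx h.symm
          rw [this]
        rw [hlast]
        cases hcase : (List.range j).find? (fun i => pvR P Q i == x) <;> rfl

lemma pvOrderLoop_run {u : Nat} (hu : 1 < u) {mm : Nat} (hmm : 0 < mm)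
    (hchar : ∀ d : Nat, u ∣ 10 ^ d - 1 ↔ mm ∣ d) :
    ∀ (fuel per : Nat), 0 < per → per ≤ mm → mm + 1 ≤ fuel + per →
    pvOrderLoop (u : Int) fuel ((10 ^ per % u : Nat) : Int) (per : Int) = (mm : Int) := by
  intro fuel
  induction fuel with
  | zero => intro per h1 h2 h3; omega
  | succ fuel ih =>
    intro per hper hpermm hfuel
    have hxiff : (((10 ^ per % u : Nat) : Int) = 1) ↔ (mm ∣ per) := by
      have c1 : (((10 ^ per % u : Nat) : Int) = 1) ↔ 10 ^ per % u = 1 := by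
        exact_mod_cast Iff.rfl
      have c2 : 10 ^ per % u = 1 ↔ u ∣ 10 ^ per - 1 := by
        have h1le : (1 : Nat) ≤ 10 ^ per := Nat.one_le_pow _ _ (by norm_num)
        have hmod1 : (1 : Nat) % u = 1 := Nat.mod_eq_of_lt hu
        constructor
        · intro h
          have hme : (10 : Nat) ^ per ≡ 1 [MOD u] := by
            unfold Nat.ModEq
            rw [h, hmod1]
          exact (Nat.modEq_iff_dvd' h1le).mp hme.symm
        · intro h
          have hme : (1 : Nat) ≡ 10 ^ per [MOD u] := (Nat.modEq_iff_dvd' h1le).mpr h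
          unfold Nat.ModEq at hme
          rw [hmod1] at hme
          exact hme.symm
      rw [c1, c2, hchar per]
    show pvOrderLoop (u : Int) (fuel + 1) _ _ = _
    simp only [pvOrderLoop]
    by_cases hstop : mm ∣ per
    · have hpm : per = mm := Nat.le_antisymm hpermm (Nat.le_of_dvd hper hstop)
      rw [if_pos (hxiff.mpr hstop), hpm]
    · have hlt : per < mm := by
        rcases Nat.lt_or_ge per mm with h | h
        · exact h
        · exact absurd (Nat.le_antisymm hpermm h ▸ dvd_refl mm) hstop
      rw [if_neg (fun h => hstop (hxiff.mp h))]
      have harg : PySem.Int.mod (((10 ^ per % u : Nat) : Int) * 10) (u : Int) =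
          ((10 ^ (per + 1) % u : Nat) : Int) := by
        have hc : (((10 ^ per % u : Nat) : Int) * 10) = ((10 ^ per % u * 10 : Nat) : Int) := by
          push_cast; ring
        rw [hc, PySem.Int.mod_natCast]
        congr 1
        rw [Nat.mod_mul_mod, ← pow_succ]
      have hpc : (per : Int) + 1 = ((per + 1 : Nat) : Int) := by push_cast; ring
      rw [harg, hpc]
      exact ih (per + 1) (by omega) (by omega) (by omega)

lemma pvDigitsLoop_run (P Q : Int) :
    ∀ (n j : Nat) (acc : List String),
    pvDigitsLoop Q n (pvR P Q j) acc = acc ++ (List.range n).map (fun i => pvDig P Q (j + i)) := by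
  intro n
  induction n with
  | zero => intro j acc; simp [pvDigitsLoop]
  | succ n ih =>
    intro j acc
    show pvDigitsLoop Q n (PySem.Int.mod (pvR P Q j * 10) Q) (acc ++ [_]) = _
    have hrem : PySem.Int.mod (pvR P Q j * 10) Q = pvR P Q (j + 1) := rfl
    rw [hrem, ih (j + 1)]
    rw [List.range_succ_eq_map]
    simp only [List.map_cons, List.map_map, Nat.add_zero, List.append_assoc]
    congr 1
    show [pvDig P Q j] ++ _ = pvDig P Q (j + 0) :: _
    rw [Nat.add_zero]
    rw [List.singleton_append]
    congr 1
    apply List.map_congr_left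
    intro x hx
    show pvDig P Q (j + 1 + x) = pvDig P Q (j + (x + 1))
    congr 1
    omega

-- ---- assembly ----
-- the common value both ports compute when the loop runs: digits split at k
def pvOut (P Q : Int) (N k : Nat) : String × String :=
  (PySem.Str.join "" (PySem.List.slice (pvDigits P Q N) none (some (k : Int))),
   PySem.Str.join "" (PySem.List.slice (pvDigits P Q N) (some (k : Int)) none))

set_option maxHeartbeats 2000000 in
theorem pvMain (p q : Int) (hq : q ≠ 0) :
    (¬ D_repeating_decimal p q → repeating_decimal p q = repeating_decimal_alt p q) ∧
    (D_repeating_decimal p q → repeating_decimal p q ≠ repeating_decimal_alt p q) := by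
  -- ---- reduction by the gcd ----
  have hg0 : 0 < Int.gcd p q := Int.gcd_pos_iff.mpr (Or.inr hq)
  set G : Int := (Int.gcd p q : Int) with hGdef
  have hGpos : 0 < G := by rw [hGdef]; exact_mod_cast hg0
  have hGne : G ≠ 0 := ne_of_gt hGpos
  set P : Int := PySem.Int.floordiv p G with hPdef
  set Q : Int := PySem.Int.floordiv q G with hQdef
  have hdvdp : G ∣ p := by rw [hGdef]; exact Int.gcd_dvd_left p q
  have hdvdq : G ∣ q := by rw [hGdef]; exact Int.gcd_dvd_right p q
  have hPg : P * G = p := pvmod_exact ((PySem.Int.mod_eq_zero_iff_dvd p G).mpr hdvdp)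
  have hQg : Q * G = q := pvmod_exact ((PySem.Int.mod_eq_zero_iff_dvd q G).mpr hdvdq)
  have hQ0 : Q ≠ 0 := by
    intro h
    apply hq
    rw [← hQg, h, zero_mul]
  have hsign : q < 0 ↔ Q < 0 := by
    constructor <;> intro h <;> nlinarith [hQg, hGpos]
  have hPQcop : Int.gcd P Q = 1 := by
    have h1 : p / G * G = p := Int.ediv_mul_cancel hdvdp
    have h2 : q / G * G = q := Int.ediv_mul_cancel hdvdq
    have hP' : P = p / G := by
      apply mul_right_cancel₀ hGne
      rw [hPg, h1]
    have hQ' : Q = q / G := by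
      apply mul_right_cancel₀ hGne
      rw [hQg, h2]
    rw [hP', hQ', hGdef]
    exact Int.gcd_div_gcd_div_gcd hg0
  -- ---- strip specs ----
  obtain ⟨na, hna2, hdec2, hnd2, ht1ne⟩ :=
    pvStripCountGo_spec 2 (by norm_num) Q.natAbs Q 0 hQ0 (le_refl _)
  set t1 : Int := (pvStripCountGo 2 Q.natAbs Q 0).1 with ht1def
  obtain ⟨nb, hnb2, hdec5, hnd5, htne⟩ :=
    pvStripCountGo_spec 5 (by norm_num) t1.natAbs t1 0 ht1ne (le_refl _)
  set t : Int := (pvStripCountGo 5 t1.natAbs t1 0).1 with htdef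
  have hAt : pvStripA 5 (pvStripA 2 Q) = t := by
    unfold pvStripA
    rw [pvStripAGo_eq_fst 2 Q.natAbs Q 0, ← ht1def, pvStripAGo_eq_fst 5 t1.natAbs t1 0]
  have htdvd : t ∣ t1 := ⟨5 ^ nb, by rw [hdec5]; ring⟩
  have hn2t : ¬ (2 : Int) ∣ t := fun h => hnd2 (h.trans htdvd)
  set u : Nat := t.natAbs with hudef
  have hu0 : 0 < u := Int.natAbs_pos.mpr htne
  have hu2 : ¬ 2 ∣ u := by
    intro h
    exact hn2t (Int.natAbs_dvd_natAbs.mp h)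
  have hu5 : ¬ 5 ∣ u := by
    intro h
    exact hnd5 (Int.natAbs_dvd_natAbs.mp h)
  have hQdec : Q = ((2 : Int) ^ na * 5 ^ nb) * t := by rw [mul_assoc, ← hdec5, ← hdec2]
  have hdecN : Q.natAbs = 2 ^ na * 5 ^ nb * u := by
    have h0 := congrArg Int.natAbs hQdec
    simpa [Int.natAbs_mul, Int.natAbs_pow] using h0
  -- ---- the analytic quantities ----
  set mm : Nat := Nat.find (pvOrdEx hu0 hu2 hu5) with hmmdef
  have hmm1 : 0 < mm := (Nat.find_spec (pvOrdEx hu0 hu2 hu5)).1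
  have hchar : ∀ d : Nat, u ∣ 10 ^ d - 1 ↔ mm ∣ d := pvOrdChar hu0 hu2 hu5
  set k : Nat := max na nb with hkdef
  set N : Nat := k + mm with hNdef
  have hKey : ∀ i j : Nat, i < j → (pvR P Q i = pvR P Q j ↔ (k ≤ i ∧ mm ∣ (j - i))) := by
    intro i j hij
    rw [pvKey hQ0 hPQcop hu2 hu5 hu0 hdecN i j hij, hchar]
  have hinj : ∀ j < N, ∀ i < j, pvR P Q i ≠ pvR P Q j := by
    intro j hj i hij h
    obtain ⟨h1, h2⟩ := (hKey i j hij).mp h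
    have := Nat.le_of_dvd (by omega) h2
    omega
  have hfin : pvR P Q N = pvR P Q k := by
    have := (hKey k N (by omega)).mpr ⟨le_refl k, by rw [show N - k = mm by omega]⟩
    exact this.symm
  have hfirst : ∀ i < k, pvR P Q i ≠ pvR P Q N := by
    intro i hik h
    have := ((hKey i N (by omega)).mp h).1
    omega
  -- ---- fuel bound N ≤ |Q| ----
  have hx1 : 1 ≤ 2 ^ na * 5 ^ nb := Nat.one_le_iff_ne_zero.mpr (by positivity)
  have hk_lt : k < 2 ^ na * 5 ^ nb := by
    rcases Nat.le_total na nb with h | h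
    · have hk : k = nb := by rw [hkdef]; omega
      have h1 : nb < 2 ^ nb := Nat.lt_two_pow_self
      have h2 : 2 ^ nb ≤ 5 ^ nb := Nat.pow_le_pow_left (by norm_num) nb
      have h3 : 5 ^ nb ≤ 2 ^ na * 5 ^ nb := Nat.le_mul_of_pos_left _ (by positivity)
      omega
    · have hk : k = na := by rw [hkdef]; omega
      have h1 : na < 2 ^ na := Nat.lt_two_pow_self
      have h3 : 2 ^ na ≤ 2 ^ na * 5 ^ nb := Nat.le_mul_of_pos_right _ (by positivity)
      omega
  have hmmu : mm ≤ u := by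
    rcases Nat.lt_or_ge 1 u with hu1 | hu1
    · have hphi : mm ≤ Nat.totient u := by
        apply Nat.find_min'
        refine ⟨Nat.totient_pos.mpr hu0, ?_⟩
        have hcop : Nat.Coprime 10 u := (pvcop10 hu2 hu5).symm
        have h := Nat.ModEq.pow_totient hcop
        exact (Nat.modEq_iff_dvd' (Nat.one_le_pow _ _ (by norm_num))).mp h.symm
      have := Nat.totient_lt u hu1
      omega
    · have hu1' : u = 1 := by omega
      have : mm ≤ 1 := Nat.find_min' _ ⟨Nat.one_pos, by rw [hu1']; exact one_dvd _⟩
      omega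
  have hNQ : N ≤ Q.natAbs := by
    rw [hdecN]
    have h1 : k + 1 ≤ 2 ^ na * 5 ^ nb := hk_lt
    have h2 : 1 ≤ u := hu0
    nlinarith
  -- ---- canonical forms of the two ports ----
  have hAeq : repeating_decimal p q =
      (if pvStripA 5 (pvStripA 2 Q) = 1 then (("" : String), ("" : String))
       else pvLoopA Q (Q.natAbs + 1) PySem.Dict.empty [] (PySem.Int.mod P Q) 0) := rfl
  have hBeq : repeating_decimal_alt p q =
      (if t.natAbs = 1 then (("" : String), ("" : String)) else pvOut P Q N k) := by
    unfold repeating_decimal_alt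
    simp only [pvStripCount]
    rw [← hPdef, ← hQdef, ← ht1def, ← htdef, ← hudef]
    by_cases hne : t.natAbs = 1
    · rw [if_pos hne, if_pos hne]
    · rw [if_neg hne, if_neg hne]
      have hu1 : 1 < u := by
        rw [hudef]
        omega
      have hOL : pvOrderLoop ((u : Nat) : Int) (((u : Nat) : Int)).natAbs
          (PySem.Int.mod 10 ((u : Nat) : Int)) 1 = ((mm : Nat) : Int) := by
        have h10 : PySem.Int.mod 10 ((u : Nat) : Int) = ((10 ^ 1 % u : Nat) : Int) := by
          rw [show (10 : Int) = ((10 : Nat) : Int) by norm_num, PySem.Int.mod_natCast]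
          norm_num
        rw [Int.natAbs_natCast, h10, show (1 : Int) = ((1 : Nat) : Int) from rfl]
        exact pvOrderLoop_run hu1 hmm1 hchar u 1 Nat.one_pos hmm1 (by omega)
      rw [hna2, hnb2, hOL]
      have hK : max (0 + ((na : Nat) : Int)) (0 + ((nb : Nat) : Int)) = ((k : Nat) : Int) := by
        rw [zero_add, zero_add, hkdef]
        exact (Nat.cast_max na nb).symm
      rw [hK]
      have hTN : (((k : Nat) : Int) + ((mm : Nat) : Int)).toNat = N := by
        rw [← Nat.cast_add, Int.toNat_natCast, hNdef]
      rw [hTN]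
      have hDL : pvDigitsLoop Q N (PySem.Int.mod P Q) [] = pvDigits P Q N := by
        rw [show PySem.Int.mod P Q = pvR P Q 0 from rfl, pvDigitsLoop_run P Q N 0 []]
        simp [pvDigits]
      rw [hDL]
      rfl
  -- ---- the loop output ----
  have hloopA : pvLoopA Q (Q.natAbs + 1) PySem.Dict.empty [] (PySem.Int.mod P Q) 0 =
      pvOut P Q N k := by
    have h0 := pvLoopA_run hQ0 (by omega : k < N) hinj hfin hfirst
      (Q.natAbs + 1) 0 PySem.Dict.empty (by omega) (by omega)
      (by intro x; simp [PySem.Dict.get?_empty])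
    exact h0
  -- ---- D_ characterisation ----
  have hD_iff : D_repeating_decimal p q ↔ (q < 0 ∧ u = 1) := by
    unfold D_repeating_decimal
    have harg : q.natAbs / Int.gcd p q = Q.natAbs := by
      have h0 := congrArg Int.natAbs hQg
      rw [Int.natAbs_mul] at h0
      have hGabs : G.natAbs = Int.gcd p q := by rw [hGdef]; exact Int.natAbs_natCast _
      rw [hGabs] at h0
      rw [← h0]
      exact Nat.mul_div_cancel _ hg0
    rw [harg]
    have hquébec : Q.natAbs ≠ 0 := fun h => hQ0 (Int.natAbs_eq_zero.mp h)
    have hiff := pvOnly25Go_iff Q.natAbs Q.natAbs hquébec (by omega)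
    constructor
    · rintro ⟨hqn, honly⟩
      refine ⟨hqn, ?_⟩
      obtain ⟨x, y, hxy⟩ := hiff.mp honly
      have hudvd : u ∣ 2 ^ x * 5 ^ y := by
        rw [← hxy, hdecN]
        exact Dvd.intro_left _ rfl
      have c2 : Nat.Coprime u 2 :=
        Nat.coprime_comm.mp ((Nat.Prime.coprime_iff_not_dvd Nat.prime_two).mpr hu2)
      have c5 : Nat.Coprime u 5 :=
        Nat.coprime_comm.mp ((Nat.Prime.coprime_iff_not_dvd Nat.prime_five).mpr hu5)
      have cu : Nat.Coprime u (2 ^ x * 5 ^ y) :=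
        Nat.Coprime.mul_right (c2.pow_right x) (c5.pow_right y)
      have h1 : u ∣ Nat.gcd u (2 ^ x * 5 ^ y) := Nat.dvd_gcd dvd_rfl hudvd
      unfold Nat.Coprime at cu
      rw [cu] at h1
      exact Nat.dvd_one.mp h1
    · rintro ⟨hqn, hu1⟩
      refine ⟨hqn, hiff.mpr ⟨na, nb, ?_⟩⟩
      rw [hdecN, hu1, mul_one]
  -- ---- final case analysis ----
  by_cases hu1 : u = 1
  · by_cases hqneg : q < 0
    · -- the D_ region: A runs its loop, B returns ("", "")
      have hD : D_repeating_decimal p q := hD_iff.mpr ⟨hqneg, hu1⟩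
      refine ⟨fun hnD => absurd hD hnD, fun _ => ?_⟩
      have hQneg : Q < 0 := hsign.mp hqneg
      have hcpos : (0 : Int) < (2 : Int) ^ na * 5 ^ nb := by positivity
      have htneg : t < 0 := by nlinarith [hQdec]
      have htne1 : t ≠ 1 := by omega
      have hBz : t.natAbs = 1 := by rw [← hudef]; exact hu1
      rw [hAeq, hAt, if_neg htne1, hloopA, hBeq, if_pos hBz]
      have hmmone : mm = 1 :=
        Nat.le_antisymm (Nat.find_min' _ ⟨Nat.one_pos, by rw [hu1]; exact one_dvd _⟩) hmm1
      have hRk : pvR P Q k = 0 := by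
        have hna_le : na ≤ k := by rw [hkdef]; exact le_max_left _ _
        have hnb_le : nb ≤ k := by rw [hkdef]; exact le_max_right _ _
        have h2k : (2 : Nat) ^ na ∣ 10 ^ k :=
          (pow_dvd_pow 2 hna_le).trans (pow_dvd_pow_of_dvd (by norm_num) k)
        have h5k : (5 : Nat) ^ nb ∣ 10 ^ k :=
          (pow_dvd_pow 5 hnb_le).trans (pow_dvd_pow_of_dvd (by norm_num) k)
        have hQabs10 : Q.natAbs ∣ 10 ^ k := by
          rw [hdecN, hu1, mul_one]
          exact Nat.Coprime.mul_dvd_of_dvd_of_dvd (Nat.Coprime.pow na nb (by norm_num)) h2k h5k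
        have hQ10 : Q ∣ (10 : Int) ^ k := by
          apply Int.natAbs_dvd_natAbs.mp
          rw [Int.natAbs_pow]
          exact hQabs10
        rw [pvR_eq P Q hQ0 k]
        exact (PySem.Int.mod_eq_zero_iff_dvd _ _).mpr (Dvd.dvd.mul_left hQ10 P)
      have hf0 : PySem.Int.floordiv 0 Q = 0 := by
        have h0 := PySem.Int.floordiv_mul_add_mod 0 Q
        have hm : PySem.Int.mod 0 Q = 0 := (PySem.Int.mod_eq_zero_iff_dvd 0 Q).mpr (dvd_zero Q)
        rw [hm, add_zero] at h0
        exact (mul_eq_zero.mp h0).resolve_right hQ0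
      have hdigk : pvDig P Q k = "0" := by
        unfold pvDig
        rw [hRk, zero_mul, hf0]
        rfl
      have hA2 : (pvOut P Q N k).2 = "0" := by
        show PySem.Str.join "" (PySem.List.slice (pvDigits P Q N) (some (k : Int)) none) = "0"
        rw [PySem.List.slice_from_natCast]
        rw [hNdef, hmmone]
        unfold pvDigits
        rw [List.range_succ, List.map_append, List.drop_left' (by simp)]
        simp only [List.map_cons, List.map_nil]
        rw [hdigk]
        rfl
      intro hcontra
      have h2 := congrArg Prod.snd hcontra
      rw [hA2] at h2
      exact absurd h2 (by decide)
    · -- q > 0 with a terminating expansion: both return ("", "")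
      have hQpos : 0 < Q := by
        rcases lt_trichotomy Q 0 with h | h | h
        · exact absurd (hsign.mpr h) hqneg
        · exact absurd h hQ0
        · exact h
      have hcpos : (0 : Int) < (2 : Int) ^ na * 5 ^ nb := by positivity
      have htpos : 0 < t := by nlinarith [hQdec]
      have hBz : t.natAbs = 1 := by rw [← hudef]; exact hu1
      have hteq1 : t = 1 := by omega
      refine ⟨fun _ => ?_, fun hD => absurd (hD_iff.mp hD).1 hqneg⟩
      rw [hAeq, hAt, if_pos hteq1, hBeq, if_pos hBz]
  · -- the generic case: both run their loops and agree
    have hnD : ¬ D_repeating_decimal p q := fun hD => hu1 (hD_iff.mp hD).2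
    refine ⟨fun _ => ?_, fun hD => absurd hD hnD⟩
    have htabs : t.natAbs ≠ 1 := by rw [← hudef]; exact hu1
    have htne1 : t ≠ 1 := by omega
    rw [hAeq, hAt, if_neg htne1, hloopA, hBeq, if_neg htabs]


-- ===== VERDICT (by name: the statement is the Claim_ definition above) =====
theorem repeating_decimal_spec : Claim_unchanged_repeating_decimal := by
  intro p q _ hpre hd
  exact (pvMain p q hpre).1 hd

theorem repeating_decimal_changed : Claim_changed_repeating_decimal := by
  unfold Claim_changed_repeating_decimal; decide

theorem repeating_decimal_tight : Claim_exact_repeating_decimal := by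
  intro p q _ hpre hd
  exact (pvMain p q hpre).2 hd
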